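-- pv_equiv track=rewrite | github.com/yudai-patronai/problembook | problems/arrays/min_number/solution.py | solve
-- ===== SOURCE A (Python) =====
-- def solve(n):
--     arr = [0] * 10
--     while n:
--         arr[n % 10] += 1
--         n //= 10
--
--     res = ''
--
--     for j in range(sum(arr)):
--         for i in range(10):
--             if j == 0 and i == 0:
--                 continue
--             if arr[i]:
--                 res += str(i)
--                 arr[i] -= 1
--                 break
--
--     return int(res)
-- ===== SOURCE B (Python) =====
-- def solve(n):
--     digits = []
--     while n:
--         digits.append(n % 10)
--         n //= 10
--     digits.sort()
--     for k, d in enumerate(digits):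
--         if d:
--             digits.pop(k)
--             digits.insert(0, d)
--             break
--     return int(''.join(map(str, digits)))
-- ===== Notes on version B (the rewrite author's own statement) =====
-- stated objective: idiomatic
-- what changed: A counting-sorts the digits into a 10-bucket array and emits them via a nested bucket-scan with a skip-zero rule on the first pick; B extracts the digits, comparison-sorts them ascending, and moves the first nonzero digit to the front in one scan.
import Mathlib
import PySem

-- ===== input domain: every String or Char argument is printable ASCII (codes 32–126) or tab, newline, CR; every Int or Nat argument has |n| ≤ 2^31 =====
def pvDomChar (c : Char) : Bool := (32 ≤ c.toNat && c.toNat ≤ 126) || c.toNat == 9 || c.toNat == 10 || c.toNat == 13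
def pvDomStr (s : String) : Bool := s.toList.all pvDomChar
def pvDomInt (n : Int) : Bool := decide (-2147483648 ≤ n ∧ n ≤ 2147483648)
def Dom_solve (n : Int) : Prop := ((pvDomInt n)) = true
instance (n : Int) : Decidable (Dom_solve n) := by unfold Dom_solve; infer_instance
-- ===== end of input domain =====

-- B replaces A's bucket-count + nested bucket-scan by sort-the-digits + move-first-nonzero-to-front (idiomatic).

-- ===== PORT A =====
-- while n: arr[n % 10] += 1; n //= 10   (Python loops forever for n < 0: the 0 < n guard only makes this total)
def solveCount (n : Int) (arr : List Int) : List Int :=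
  if h : 0 < n then
    solveCount (PySem.Int.floordiv n 10)
      (arr.set (PySem.Int.mod n 10).toNat (arr.getD (PySem.Int.mod n 10).toNat 0 + 1))
  else arr
termination_by n.toNat
decreasing_by
  rw [PySem.Int.floordiv_eq_ediv_of_pos (by omega : (0:Int) < 10)]
  omega

-- the inner 'for i in range(10): … break' scan; returns the chosen digit (if any) and the updated arr
def solveInner (j : Int) (i : Int) (arr : List Int) : Option Int × List Int :=
  match arr with
  | [] => (none, [])
  | c :: cs =>
    if j == 0 && i == 0 then
      let r := solveInner j (i + 1) cs
      (r.1, c :: r.2)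
    else if c ≠ 0 then (some i, (c - 1) :: cs)
    else
      let r := solveInner j (i + 1) cs
      (r.1, c :: r.2)

-- res is kept as List Char; int(res) at the end. For n = 0 Python raises ValueError (excluded by Pre_): .getD 0 is a totality default.
def solve (n : Int) : Int :=
  let arr := solveCount n (List.replicate 10 0)
  let p := (PySem.List.pyRange 0 arr.sum 1).foldl
    (fun (st : List Char × List Int) j =>
      match solveInner j 0 st.2 with
      | (some i, arr') => (st.1 ++ PySem.Int.toChars i, arr')
      | (none, arr') => (st.1, arr'))
    ([], arr)
  (PySem.Int.ofChars? p.1).getD 0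

-- ===== PORT B =====
-- while n: digits.append(n % 10); n //= 10   (same totality guard note as above)
def altDigits (n : Int) : List Int :=
  if _h : 0 < n then PySem.Int.mod n 10 :: altDigits (PySem.Int.floordiv n 10) else []
termination_by n.toNat
decreasing_by
  rw [PySem.Int.floordiv_eq_ediv_of_pos (by omega : (0:Int) < 10)]
  omega

-- for k, d in enumerate(digits): if d: pop(k); insert(0, d); break  — acc carries the scanned prefix
def altMove (acc : List Int) (l : List Int) : List Int :=
  match l with
  | [] => acc.reverse
  | d :: rest => if d ≠ 0 then d :: (acc.reverse ++ rest) else altMove (d :: acc) rest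

def solve_alt (n : Int) : Int :=
  let ds := PySem.List.sorted (altDigits n) (fun x => x) false
  let ds := altMove [] ds
  (PySem.Int.ofChars? ((ds.map PySem.Int.toChars).flatten)).getD 0

-- ===== PRECONDITION & SPEC =====
-- Pre_ excludes n = 0 (int('') raises ValueError in A) and n < 0 (A's while loop never terminates).
def Pre_solve (n : Int) : Prop := 1 ≤ n
instance (n : Int) : Decidable (Pre_solve n) := by unfold Pre_solve; infer_instance
def pvWitness_solve : Int := 2075

def Spec_solve (n : Int) (out : Int) : Prop := out = solve_alt n
instance (n : Int) (out : Int) : Decidable (Spec_solve n out) := by unfold Spec_solve; infer_instance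

-- ===== CLAIM (what is proved, stated in full; the proofs are below) =====
def Claim_equal_solve : Prop := ∀ (n : Int), Dom_solve n → Pre_solve n → Spec_solve n (solve n)

-- ===== LEMMAS AND PROOFS =====

-- ascending expansion of a bucket array: expd [c0,c1,…] i = i×c0, (i+1)×c1, …
def expd (cs : List Int) (i : Int) : List Int :=
  match cs with
  | [] => []
  | c :: cs => List.replicate c.toNat i ++ expd cs (i + 1)

-- increment bucket k
def incAt (k : Nat) (l : List Int) : List Int :=
  match k, l with
  | _, [] => []
  | 0, c :: cs => (c + 1) :: cs
  | k + 1, c :: cs => c :: incAt k cs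

def cntFold (ds : List Int) (arr : List Int) : List Int :=
  ds.foldl (fun a d => incAt d.toNat a) arr

def strOfD (l : List Int) : List Char := (l.map PySem.Int.toChars).flatten

lemma mem_expd {x : Int} {cs : List Int} {i : Int} (h : x ∈ expd cs i) : i ≤ x := by
  induction cs generalizing i with
  | nil => simp [expd] at h
  | cons c cs ih =>
    simp only [expd, List.mem_append, List.mem_replicate] at h
    rcases h with ⟨-, rfl⟩ | h
    · exact le_refl _
    · have := ih h; omega

lemma expd_pairwise (cs : List Int) (i : Int) : (expd cs i).Pairwise (· ≤ ·) := by
  induction cs generalizing i with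
  | nil => simp [expd]
  | cons c cs ih =>
    simp only [expd]
    refine List.pairwise_append.2 ⟨List.pairwise_replicate.2 (Or.inr le_rfl), ih (i + 1), ?_⟩
    intro a ha b hb
    rcases List.eq_of_mem_replicate ha with rfl
    have := mem_expd hb; omega

lemma expd_eq_nil {cs : List Int} (h : ∀ c ∈ cs, c ≤ 0) (i : Int) : expd cs i = [] := by
  induction cs generalizing i with
  | nil => rfl
  | cons c cs ih =>
    have hc : c.toNat = 0 := by have := h c (by simp); omega
    simp [expd, hc, ih (fun c hc => h c (by simp [hc]))]

lemma length_expd {cs : List Int} (h : ∀ c ∈ cs, 0 ≤ c) (i : Int) :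
    (expd cs i).length = cs.sum.toNat := by
  induction cs generalizing i with
  | nil => rfl
  | cons c cs ih =>
    have hs : 0 ≤ cs.sum := List.sum_nonneg (fun c hc => h c (by simp [hc]))
    have hc : 0 ≤ c := h c (by simp)
    simp only [expd, List.length_append, List.length_replicate, List.sum_cons,
      ih (fun c hc => h c (by simp [hc]))]
    omega

lemma mem_expd_exists {x : Int} {cs : List Int} {i : Int} (h : x ∈ expd cs i) :
    ∃ c ∈ cs, c ≠ 0 := by
  induction cs generalizing i with
  | nil => simp [expd] at h
  | cons c cs ih =>
    simp only [expd, List.mem_append, List.mem_replicate] at h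
    rcases h with ⟨hc, -⟩ | h
    · exact ⟨c, by simp, by omega⟩
    · obtain ⟨c', hc', hne⟩ := ih h
      exact ⟨c', by simp [hc'], hne⟩

lemma incAt_length (k : Nat) (l : List Int) : (incAt k l).length = l.length := by
  induction l generalizing k with
  | nil => cases k <;> rfl
  | cons c cs ih => cases k with
    | zero => rfl
    | succ k => simp [incAt, ih k]

lemma incAt_nonneg {l : List Int} (h : ∀ c ∈ l, 0 ≤ c) (k : Nat) : ∀ c ∈ incAt k l, 0 ≤ c := by
  induction l generalizing k with
  | nil => cases k <;> simpa [incAt] using h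
  | cons c cs ih =>
    cases k with
    | zero =>
      intro x hx
      rcases List.mem_cons.1 hx with rfl | hx
      · have := h c (by simp); omega
      · exact h x (by simp [hx])
    | succ k =>
      intro x hx
      rcases List.mem_cons.1 hx with rfl | hx
      · exact h x (by simp)
      · exact ih (fun c hc => h c (by simp [hc])) k x hx

lemma incAt_comm (a b : Nat) (l : List Int) : incAt a (incAt b l) = incAt b (incAt a l) := by
  induction l generalizing a b with
  | nil => cases a <;> cases b <;> rfl
  | cons c cs ih =>
    cases a with
    | zero => cases b <;> rfl
    | succ a => cases b with
      | zero => rfl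
      | succ b => simp [incAt, ih a b]

lemma set_getD_eq_incAt {k : Nat} {l : List Int} (h : k < l.length) :
    l.set k (l.getD k 0 + 1) = incAt k l := by
  induction l generalizing k with
  | nil => simp at h
  | cons c cs ih =>
    cases k with
    | zero => rfl
    | succ k => simpa [incAt] using ih (by simpa using h)

lemma expd_incAt_perm {k : Nat} {cs : List Int} (hk : k < cs.length)
    (hnn : ∀ c ∈ cs, 0 ≤ c) (i : Int) :
    (expd (incAt k cs) i).Perm ((i + k) :: expd cs i) := by
  induction cs generalizing k i with
  | nil => simp at hk
  | cons c cs ih =>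
    cases k with
    | zero =>
      have hc : 0 ≤ c := hnn c (by simp)
      have h1 : (c + 1).toNat = c.toNat + 1 := by omega
      simp [incAt, expd, h1, List.replicate_succ]
    | succ k =>
      have hih := ih (by simpa using hk) (fun c hc => hnn c (by simp [hc])) (i + 1)
      have hcast : i + (((k : Nat) + 1 : Nat) : Int) = (i + 1) + (k : Int) := by push_cast; ring
      show (List.replicate c.toNat i ++ expd (incAt k cs) (i + 1)).Perm
        ((i + (((k : Nat) + 1 : Nat) : Int)) :: (List.replicate c.toNat i ++ expd cs (i + 1)))
      rw [hcast]
      exact (hih.append_left _).trans List.perm_middle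

lemma cntFold_cons (d : Int) (ds : List Int) (arr : List Int) :
    cntFold (d :: ds) arr = cntFold ds (incAt d.toNat arr) := rfl

lemma cntFold_swap (ds : List Int) (k : Nat) (arr : List Int) :
    cntFold ds (incAt k arr) = incAt k (cntFold ds arr) := by
  induction ds generalizing arr with
  | nil => rfl
  | cons d ds ih => simp only [cntFold_cons, incAt_comm, ih]

lemma cntFold_length (ds : List Int) (arr : List Int) :
    (cntFold ds arr).length = arr.length := by
  induction ds generalizing arr with
  | nil => rfl
  | cons d ds ih => simp only [cntFold_cons, ih, incAt_length]

lemma cntFold_nonneg {arr : List Int} (h : ∀ c ∈ arr, 0 ≤ c) (ds : List Int) :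
    ∀ c ∈ cntFold ds arr, 0 ≤ c := by
  induction ds generalizing arr with
  | nil => exact h
  | cons d ds ih => exact ih (incAt_nonneg h _)

lemma solveCount_eq (n : Int) (arr : List Int) (h : arr.length = 10) :
    solveCount n arr = cntFold (altDigits n) arr := by
  induction n, arr using solveCount.induct with
  | case1 n arr hpos ih =>
    have hm : (PySem.Int.mod n 10).toNat < arr.length := by
      have h1 := PySem.Int.mod_nonneg n (b := 10) (by omega)
      have h2 := PySem.Int.mod_lt n (b := 10) (by omega)
      omega
    rw [solveCount, altDigits, dif_pos hpos, dif_pos hpos, cntFold_cons,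
      ih (by rw [List.length_set]; exact h), set_getD_eq_incAt hm]
  | case2 n arr hpos =>
    rw [solveCount, altDigits, dif_neg hpos, dif_neg hpos]
    rfl

lemma altDigits_bounds {n d : Int} (h : d ∈ altDigits n) : 0 ≤ d ∧ d < 10 := by
  induction n using altDigits.induct with
  | case1 n hpos ih =>
    rw [altDigits, dif_pos hpos] at h
    rcases List.mem_cons.1 h with rfl | h
    · exact ⟨PySem.Int.mod_nonneg n (by omega), PySem.Int.mod_lt n (by omega)⟩
    · exact ih h
  | case2 n hpos => rw [altDigits, dif_neg hpos] at h; simp at h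

lemma altDigits_exists_pos {n : Int} (h : 1 ≤ n) : ∃ d ∈ altDigits n, 0 < d := by
  induction n using altDigits.induct with
  | case1 n hpos ih =>
    rw [altDigits, dif_pos hpos]
    by_cases hq : 1 ≤ PySem.Int.floordiv n 10
    · obtain ⟨d, hd, hdp⟩ := ih hq
      exact ⟨d, List.mem_cons_of_mem _ hd, hdp⟩
    · have he := PySem.Int.floordiv_mul_add_mod n 10
      have hnn := PySem.Int.mod_nonneg n (b := 10) (by omega)
      have hq0 : PySem.Int.floordiv n 10 = 0 := by
        rw [PySem.Int.floordiv_eq_ediv_of_pos (by omega : (0:Int) < 10)] at hq ⊢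
        omega
      refine ⟨PySem.Int.mod n 10, by simp, ?_⟩
      rw [hq0] at he
      omega
  | case2 n hpos => omega

lemma perm_expd_cnt {ds : List Int} (h : ∀ d ∈ ds, 0 ≤ d ∧ d < 10) :
    (expd (cntFold ds (List.replicate 10 0)) 0).Perm ds := by
  induction ds with
  | nil =>
    have h0 : expd (List.replicate 10 (0:Int)) 0 = [] :=
      expd_eq_nil (fun c hc => by rcases List.eq_of_mem_replicate hc with rfl; omega) 0
    rw [show cntFold [] (List.replicate 10 (0:Int)) = List.replicate 10 0 from rfl, h0]
  | cons d ds ih =>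
    have hd := h d (by simp)
    have hrest : ∀ d ∈ ds, 0 ≤ d ∧ d < 10 := fun d hd => h d (by simp [hd])
    have hlen : d.toNat < (cntFold ds (List.replicate 10 (0:Int))).length := by
      rw [cntFold_length, List.length_replicate]; omega
    have hnn : ∀ c ∈ cntFold ds (List.replicate 10 (0:Int)), 0 ≤ c :=
      cntFold_nonneg (fun c hc => by rcases List.eq_of_mem_replicate hc with rfl; omega) ds
    rw [cntFold_cons, cntFold_swap]
    have h2 := expd_incAt_perm hlen hnn 0
    rw [zero_add, Int.toNat_of_nonneg hd.1] at h2
    exact h2.trans ((ih hrest).cons d)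

lemma inner_step (j : Int) : ∀ (i : Int) (arr : List Int), (j ≠ 0 ∨ 0 < i) →
    (∀ c ∈ arr, 0 ≤ c) → (∃ c ∈ arr, c ≠ 0) →
    ∃ d arr', solveInner j i arr = (some d, arr') ∧ expd arr i = d :: expd arr' i ∧
      arr'.sum = arr.sum - 1 ∧ (∀ c ∈ arr', 0 ≤ c) ∧ i ≤ d ∧ arr'.length = arr.length := by
  intro i arr
  induction arr generalizing i with
  | nil => intro _ _ hex; simp at hex
  | cons c cs ih =>
    intro hji hnn hex
    have hcond : (j == 0 && i == 0) = false := by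
      rcases hji with hj | hi
      · simp [hj]
      · have hi' : i ≠ 0 := by omega
        simp [hi']
    by_cases hc : c = 0
    · subst hc
      obtain ⟨x, hx, hxne⟩ := hex
      have hxcs : x ∈ cs := by
        rcases List.mem_cons.1 hx with rfl | h
        · exact absurd rfl hxne
        · exact h
      have hji' : j ≠ 0 ∨ 0 < i + 1 := by
        rcases hji with h | h
        · exact Or.inl h
        · exact Or.inr (by omega)
      obtain ⟨d, cs', hsi, hexp, hsum, hnn', hid, hlen⟩ :=
        ih (i + 1) hji' (fun c hc => hnn c (by simp [hc])) ⟨x, hxcs, hxne⟩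
      refine ⟨d, 0 :: cs', ?_, ?_, ?_, ?_, by omega, by simp [hlen]⟩
      · simp [solveInner, hcond, hsi]
      · simp [expd, hexp]
      · simp [hsum]
      · intro y hy
        rcases List.mem_cons.1 hy with rfl | hy
        · exact le_rfl
        · exact hnn' y hy
    · refine ⟨i, (c - 1) :: cs, ?_, ?_, ?_, ?_, le_rfl, rfl⟩
      · simp [solveInner, hcond, hc]
      · have hc0 : 0 ≤ c := hnn c (by simp)
        have h1 : c.toNat = (c - 1).toNat + 1 := by omega
        rw [show expd (c :: cs) i = List.replicate c.toNat i ++ expd cs (i + 1) from rfl,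
          h1, List.replicate_succ]
        rfl
      · simp [List.sum_cons]; ring
      · intro x hx
        rcases List.mem_cons.1 hx with rfl | hx
        · have := hnn c (by simp); omega
        · exact hnn x (by simp [hx])

lemma tail_fold (js : List Int) : ∀ (arr : List Int) (res : List Char),
    (∀ j ∈ js, j ≠ 0) → (∀ c ∈ arr, 0 ≤ c) → arr.sum = js.length →
    (js.foldl
      (fun (st : List Char × List Int) j =>
        match solveInner j 0 st.2 with
        | (some i, arr') => (st.1 ++ PySem.Int.toChars i, arr')
        | (none, arr') => (st.1, arr'))
      (res, arr)).1 = res ++ strOfD (expd arr 0) := by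
  induction js with
  | nil =>
    intro arr res _ hnn hsum
    have hz : ∀ c ∈ arr, c ≤ 0 := by
      intro c hc
      have h1 : c ≤ arr.sum := List.single_le_sum (fun x hx => hnn x hx) c hc
      simp at hsum
      omega
    simp [List.foldl_nil, expd_eq_nil hz, strOfD]
  | cons j js ih =>
    intro arr res hjs hnn hsum
    have hexists : ∃ c ∈ arr, c ≠ 0 := by
      by_contra hall
      push_neg at hall
      have h0 : arr.sum = 0 := List.sum_eq_zero hall
      rw [h0] at hsum
      simp at hsum
      omega
    obtain ⟨d, arr', hsi, hexp, hsum', hnn', -, -⟩ :=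
      inner_step j 0 arr (Or.inl (hjs j (by simp))) hnn hexists
    rw [List.foldl_cons]
    simp only [hsi]
    rw [ih arr' (res ++ PySem.Int.toChars d) (fun j hj => hjs j (by simp [hj])) hnn'
      (by simp at hsum ⊢; omega)]
    rw [hexp]
    simp [strOfD]

lemma altMove_zeros (d : Int) (hd : d ≠ 0) (rest : List Int) :
    ∀ (z : Nat) (acc : List Int),
    altMove acc (List.replicate z 0 ++ d :: rest) = d :: (acc.reverse ++ (List.replicate z 0 ++ rest)) := by
  intro z
  induction z with
  | zero => intro acc; simp [altMove, hd]
  | succ z ih =>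
    intro acc
    rw [List.replicate_succ, List.cons_append,
      show altMove acc ((0:Int) :: (List.replicate z 0 ++ d :: rest))
        = altMove (0 :: acc) (List.replicate z 0 ++ d :: rest) from by simp [altMove],
      ih]
    simp

lemma expd_cons_zero (a0 : Int) (cs : List Int) :
    expd (a0 :: cs) 0 = List.replicate a0.toNat 0 ++ expd cs 1 := by
  show List.replicate a0.toNat 0 ++ expd cs (0 + 1) = _
  norm_num

-- ===== VERDICT (by name: the statement is the Claim_ definition above) =====
theorem solve_spec : Claim_equal_solve := by
  intro n _ hn
  have hn1 : (1 : Int) ≤ n := hn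
  show solve n = solve_alt n
  have hb : ∀ d ∈ altDigits n, 0 ≤ d ∧ d < 10 := fun d hd => altDigits_bounds hd
  have harr : solveCount n (List.replicate 10 0) = cntFold (altDigits n) (List.replicate 10 0) :=
    solveCount_eq n _ (by simp)
  set ds := altDigits n with hds
  set arr := cntFold ds (List.replicate 10 0) with harrdef
  have hperm : (expd arr 0).Perm ds := perm_expd_cnt hb
  have hRnn : ∀ c ∈ List.replicate 10 (0 : Int), 0 ≤ c := fun c hc => by
    rcases List.eq_of_mem_replicate hc with rfl; omega
  have hnn : ∀ c ∈ arr, 0 ≤ c := cntFold_nonneg hRnn ds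
  have hlen10 : arr.length = 10 := by rw [harrdef, cntFold_length]; simp
  obtain ⟨d0, hd0m, hd0p⟩ := altDigits_exists_pos hn1
  obtain ⟨a0, cs, hsplit⟩ : ∃ a0 cs, arr = a0 :: cs := by
    cases harr2 : arr with
    | nil => rw [harr2] at hlen10; simp at hlen10
    | cons a0 cs => exact ⟨a0, cs, rfl⟩
  have hd0e : d0 ∈ expd arr 0 := hperm.mem_iff.2 hd0m
  have hd0cs : d0 ∈ expd cs 1 := by
    rw [hsplit, expd_cons_zero] at hd0e
    rcases List.mem_append.1 hd0e with h | h
    · rcases List.eq_of_mem_replicate h with rfl; omega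
    · exact h
  have hexcs : ∃ c ∈ cs, c ≠ 0 := mem_expd_exists hd0cs
  have hnncs : ∀ c ∈ cs, 0 ≤ c := fun c hc => hnn c (by rw [hsplit]; simp [hc])
  obtain ⟨m, cs', hsi, hexp, hsum', hnn', hm1, hlen'⟩ :=
    inner_step 0 1 cs (Or.inr one_pos) hnncs hexcs
  have hsumds : arr.sum = (ds.length : Int) := by
    have h1 := hperm.length_eq
    rw [length_expd hnn 0] at h1
    have h2 : 0 ≤ arr.sum := List.sum_nonneg hnn
    omega
  have hdsne : 0 < ds.length := List.length_pos_of_mem hd0m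
  have hspos : (0 : Int) < arr.sum := by rw [hsumds]; exact_mod_cast hdsne
  have hsumsplit : arr.sum = a0 + cs.sum := by rw [hsplit]; simp
  -- first iteration (j = 0): skip bucket 0, pick the smallest nonzero digit m
  have hstep0 : solveInner 0 0 (a0 :: cs) = (some m, a0 :: cs') := by
    simp [solveInner, hsi]
  -- A side
  have hA : solve n
      = (PySem.Int.ofChars? (PySem.Int.toChars m ++ strOfD (expd (a0 :: cs') 0))).getD 0 := by
    simp only [solve]
    rw [harr, PySem.List.pyRange_one_cons hspos, List.foldl_cons]
    simp only [hsplit, hstep0, zero_add]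
    rw [tail_fold _ (a0 :: cs') ([] ++ PySem.Int.toChars m)
      (fun j hj => by have := (PySem.List.mem_pyRange_one.1 hj).1; omega)
      (by intro c hc
          rcases List.mem_cons.1 hc with rfl | hc
          · exact hnn c (by rw [hsplit]; simp)
          · exact hnn' c hc)
      (by rw [PySem.List.length_pyRange_one]
          simp only [List.sum_cons, hsum']
          omega)]
    simp
  -- B side
  have hsorted : PySem.List.sorted ds (fun x => x) false = expd arr 0 :=
    PySem.List.sorted_id_eq_of_perm_of_pairwise _ _ hperm (expd_pairwise arr 0)
  have hm0 : m ≠ 0 := by omega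
  have hBlist : altMove [] (expd arr 0) = m :: (List.replicate a0.toNat 0 ++ expd cs' 1) := by
    rw [hsplit, expd_cons_zero, hexp, altMove_zeros m hm0 (expd cs' 1) a0.toNat []]
    simp
  have hB : solve_alt n
      = (PySem.Int.ofChars? (strOfD (m :: (List.replicate a0.toNat 0 ++ expd cs' 1)))).getD 0 := by
    simp only [solve_alt]
    rw [← hds, hsorted, hBlist]
    rfl
  rw [hA, hB, expd_cons_zero]
  have : strOfD (m :: (List.replicate a0.toNat 0 ++ expd cs' 1))
      = PySem.Int.toChars m ++ strOfD (List.replicate a0.toNat 0 ++ expd cs' 1) := by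
    simp [strOfD]
  rw [this]
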